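-- pv_equiv track=rewrite | github.com/GSCFin/rust-asr | rust_asr/analysis/ast_analysis.py | _summarize_trait_implementations
-- ===== SOURCE A (Python) =====
-- def _summarize_trait_implementations(impl_blocks: list[dict]) -> dict[str, list[str]]:
--     """Summarize which types implement which traits."""
--     trait_to_types: dict[str, list[str]] = {}
--
--     for impl_block in impl_blocks:
--         if impl_block.get("trait"):
--             trait = impl_block["trait"]
--             type_name = impl_block["type"]
--
--             if trait not in trait_to_types:
--                 trait_to_types[trait] = []
--             if type_name not in trait_to_types[trait]:
--                 trait_to_types[trait].append(type_name)
--
--     return dict(sorted(trait_to_types.items(), key=lambda x: -len(x[1])))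
-- ===== SOURCE B (Python) =====
-- def _summarize_trait_implementations(impl_blocks: list[dict]) -> dict[str, list[str]]:
--     """Summarize which types implement which traits."""
--     # Stage 1: collect the distinct (trait, type) pairs in first-occurrence order.
--     seen = set()
--     pairs = []
--     for block in impl_blocks:
--         if block.get("trait"):
--             pair = (block["trait"], block["type"])
--             if pair not in seen:
--                 seen.add(pair)
--                 pairs.append(pair)
--     # Stage 2: group the already-unique pairs by trait.
--     trait_to_types: dict[str, list[str]] = {}
--     for trait, type_name in pairs:
--         trait_to_types.setdefault(trait, []).append(type_name)
--     # Stage 3: order traits by descending number of implementing types.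
--     return dict(sorted(trait_to_types.items(), key=lambda kv: -len(kv[1])))
-- ===== Notes on version B (the rewrite author's own statement) =====
-- stated objective: alternative
-- what changed: A's single interleaved loop (dict-membership + per-trait list-membership checks while building) is split into three separate stages: a global dedup of (trait, type) pairs with one seen-set, then a grouping pass over the already-unique pairs, then the sort by descending group size.
-- outside the precondition, e.g. on _summarize_trait_implementations([{'trait': 'A'}]): A raises KeyError, B raises KeyError
import Mathlib
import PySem

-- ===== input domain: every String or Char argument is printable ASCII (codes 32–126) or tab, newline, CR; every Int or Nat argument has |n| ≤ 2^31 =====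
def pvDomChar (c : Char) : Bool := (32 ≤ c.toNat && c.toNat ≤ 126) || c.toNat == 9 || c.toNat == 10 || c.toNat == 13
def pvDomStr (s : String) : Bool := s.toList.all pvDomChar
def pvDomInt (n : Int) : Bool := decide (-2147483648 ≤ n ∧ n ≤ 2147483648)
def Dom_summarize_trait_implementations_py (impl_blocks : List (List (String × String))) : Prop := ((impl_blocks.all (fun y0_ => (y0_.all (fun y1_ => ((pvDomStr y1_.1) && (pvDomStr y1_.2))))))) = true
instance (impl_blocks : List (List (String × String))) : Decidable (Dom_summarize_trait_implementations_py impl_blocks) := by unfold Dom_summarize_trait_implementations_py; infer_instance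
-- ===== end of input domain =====

-- B restructures A's single interleaved accumulate-and-membership-check loop into three
-- separate stages (global pair dedup, then grouping, then the sort); same results, similar cost.

-- ===== PORT A =====
-- one iteration of A's loop body
def pvStepA (d : PySem.Dict String (List String)) (impl_block : List (String × String)) :
    PySem.Dict String (List String) :=
  match (PySem.Dict.mk impl_block).get? "trait" with
  | some trait =>
    if trait ≠ "" then
      -- impl_block["type"]: Pre_ guarantees the key is present; getD "" is never taken inside Pre_
      let type_name := ((PySem.Dict.mk impl_block).get? "type").getD ""
      let d1 := if d.contains trait then d else d.insert trait []
      if (d1.getD trait []).contains type_name then d1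
      else d1.insert trait (d1.getD trait [] ++ [type_name])
    else d
  | none => d

def summarize_trait_implementations_py (impl_blocks : List (List (String × String))) :
    List (String × List String) :=
  let trait_to_types := impl_blocks.foldl pvStepA PySem.Dict.empty
  PySem.List.sorted trait_to_types.items (fun x => -(x.2.length : Int)) false

-- ===== PORT B =====
-- stage 1 of B, one iteration: global dedup of (trait, type) pairs with a seen-set
def pvStepB (st : PySem.Set (String × String) × List (String × String))
    (impl_block : List (String × String)) :
    PySem.Set (String × String) × List (String × String) :=
  match (PySem.Dict.mk impl_block).get? "trait" with
  | some trait =>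
    if trait ≠ "" then
      let pair := (trait, ((PySem.Dict.mk impl_block).get? "type").getD "")
      if PySem.Set.contains st.1 pair then st
      else (PySem.Set.add st.1 pair, st.2 ++ [pair])
    else st
  | none => st

-- stage 2 of B: group already-unique pairs (setdefault(trait, []).append(type))
def pvGroup (pairs : List (String × String)) : PySem.Dict String (List String) :=
  pairs.foldl (fun d p => d.modify p.1 [] (· ++ [p.2])) PySem.Dict.empty

def summarize_trait_implementations_py_alt (impl_blocks : List (List (String × String))) :
    List (String × List String) :=
  let pairs := (impl_blocks.foldl pvStepB (PySem.Set.empty, [])).2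
  let trait_to_types := pvGroup pairs
  PySem.List.sorted trait_to_types.items (fun x => -(x.2.length : Int)) false

-- ===== PRECONDITION & SPEC =====
-- Pre_ excludes exactly the blocks where Python A raises KeyError: a truthy "trait" but no "type" key
-- (B raises there too).
def Pre_summarize_trait_implementations_py (impl_blocks : List (List (String × String))) : Prop :=
  (impl_blocks.all (fun b =>
    match (PySem.Dict.mk b).get? "trait" with
    | some t => (t == "") || (PySem.Dict.mk b).contains "type"
    | none => true)) = true
instance (impl_blocks : List (List (String × String))) : Decidable (Pre_summarize_trait_implementations_py impl_blocks) := by unfold Pre_summarize_trait_implementations_py; infer_instance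

def pvWitness_summarize_trait_implementations_py : (List (List (String × String))) :=
  [[("trait", "Display"), ("type", "Foo")], [("trait", "Display"), ("type", "Bar")], [("trait", "Clone"), ("type", "Foo")]]

def Spec_summarize_trait_implementations_py (impl_blocks : List (List (String × String))) (out : List (String × List String)) : Prop := out = summarize_trait_implementations_py_alt impl_blocks
instance (impl_blocks : List (List (String × String))) (out : List (String × List String)) : Decidable (Spec_summarize_trait_implementations_py impl_blocks out) := by unfold Spec_summarize_trait_implementations_py; infer_instance

-- ===== CLAIM (what is proved, stated in full; the proofs are below) =====
def Claim_equal_summarize_trait_implementations_py : Prop := ∀ (impl_blocks : List (List (String × String))), Dom_summarize_trait_implementations_py impl_blocks → Pre_summarize_trait_implementations_py impl_blocks → Spec_summarize_trait_implementations_py impl_blocks (summarize_trait_implementations_py impl_blocks)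

-- ===== LEMMAS AND PROOFS =====

lemma pvGroup_getD (pairs : List (String × String)) (t : String) :
    (pvGroup pairs).getD t [] = (pairs.filter (fun p => p.1 == t)).map (·.2) := by
  unfold pvGroup
  rw [PySem.Dict.getD_foldl_modify_append]
  simp

lemma pvGroup_contains (pairs : List (String × String)) (t : String) :
    (pvGroup pairs).contains t = true ↔ (∃ ty, (t, ty) ∈ pairs) := by
  rw [PySem.Dict.contains_iff_mem_keys]
  unfold pvGroup
  rw [PySem.Dict.keys_foldl_modify_key]
  simp only [PySem.Dict.keys_empty, PySem.Set.update]
  rw [← PySem.Set.ofList_eq_foldl, PySem.Set.mem_ofList]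
  simp only [List.mem_map]
  constructor
  · rintro ⟨p, hp, rfl⟩; exact ⟨p.2, hp⟩
  · rintro ⟨ty, h⟩; exact ⟨(t, ty), h, rfl⟩

lemma pvGroup_mem_val (pairs : List (String × String)) (t ty : String) :
    ty ∈ (pvGroup pairs).getD t [] ↔ (t, ty) ∈ pairs := by
  rw [pvGroup_getD]
  simp only [List.mem_map, List.mem_filter, beq_iff_eq]
  constructor
  · rintro ⟨⟨a, b⟩, ⟨hp, h1⟩, h2⟩
    simp only at h1 h2; subst h1; subst h2; exact hp
  · intro h; exact ⟨(t, ty), ⟨h, rfl⟩, rfl⟩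

lemma pvGroup_append_singleton (pairs : List (String × String)) (p : String × String) :
    pvGroup (pairs ++ [p]) = (pvGroup pairs).insert p.1 ((pvGroup pairs).getD p.1 [] ++ [p.2]) := by
  unfold pvGroup
  rw [List.foldl_append]
  simp [PySem.Dict.modify]

lemma pvStep_eq (pairs : List (String × String)) (b : List (String × String)) :
    pvStepA (pvGroup pairs) b = pvGroup ((pvStepB (pairs, pairs) b).2) ∧
    (pvStepB (pairs, pairs) b).1 = (pvStepB (pairs, pairs) b).2 := by
  unfold pvStepA pvStepB
  cases hget : (PySem.Dict.mk b).get? "trait" with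
  | none => exact ⟨rfl, rfl⟩
  | some trait =>
    by_cases ht : trait = ""
    · simp [ht]
    · simp only [ne_eq, ht, not_false_iff, if_true]
      by_cases hmem : (trait, ((PySem.Dict.mk b).get? "type").getD "") ∈ pairs
      · have hdcont : (pvGroup pairs).contains trait = true :=
          (pvGroup_contains pairs trait).mpr ⟨_, hmem⟩
        have hval : ((PySem.Dict.mk b).get? "type").getD "" ∈ (pvGroup pairs).getD trait [] :=
          (pvGroup_mem_val pairs trait _).mpr hmem
        simp [hmem, hdcont, hval, List.contains_eq_mem]
      · have hval : ¬ (((PySem.Dict.mk b).get? "type").getD "" ∈ (pvGroup pairs).getD trait []) :=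
          fun h => hmem ((pvGroup_mem_val pairs trait _).mp h)
        refine ⟨?_, by simp [hmem]⟩
        by_cases hc : (pvGroup pairs).contains trait = true
        · simp [if_neg hmem, pvGroup_append_singleton, hc]
          exact fun h => absurd h hval
        · have hg : (pvGroup pairs).getD trait [] = [] :=
            PySem.Dict.getD_of_not_contains _ _ (by simpa using hc)
          simp [if_neg hmem, pvGroup_append_singleton, hc, hg,
            PySem.Dict.getD_insert_self, PySem.Dict.insert_insert_self]

lemma pvMain (bs : List (List (String × String))) (pairs : List (String × String)) :
    bs.foldl pvStepA (pvGroup pairs) = pvGroup ((bs.foldl pvStepB (pairs, pairs)).2) := by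
  induction bs generalizing pairs with
  | nil => rfl
  | cons b bs ih =>
    obtain ⟨h1, h2⟩ := pvStep_eq pairs b
    simp only [List.foldl_cons]
    have hst : pvStepB (pairs, pairs) b = ((pvStepB (pairs, pairs) b).2, (pvStepB (pairs, pairs) b).2) := by
      exact Prod.ext h2 rfl
    rw [h1, hst, ih]

-- ===== VERDICT (by name: the statement is the Claim_ definition above) =====
theorem summarize_trait_implementations_py_spec : Claim_equal_summarize_trait_implementations_py := by
  intro impl_blocks _ _
  unfold Spec_summarize_trait_implementations_py
  unfold summarize_trait_implementations_py summarize_trait_implementations_py_alt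
  have h := pvMain impl_blocks []
  simp only [pvGroup, List.foldl_nil] at h ⊢
  rw [show (PySem.Set.empty : PySem.Set (String × String)) = ([] : List (String × String)) from rfl] at *
  rw [h]
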